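-- pv_equiv track=rewrite | github.com/kaplanae/rallyrung | app.py | validate_set_score
-- ===== SOURCE A (Python) =====
-- def validate_set_score(p1, p2):
--     """Validate a single set score follows tennis rules."""
--     if p1 is None or p2 is None:
--         return True  # optional set
--     if not (isinstance(p1, int) and isinstance(p2, int)):
--         return False
--     if p1 < 0 or p2 < 0:
--         return False
--     # Valid set scores: 6-0..6-4, 7-5, 7-6, or reversed
--     valid_scores = set()
--     for w in range(5):  # 6-0 through 6-4
--         valid_scores.add((6, w))
--         valid_scores.add((w, 6))
--     valid_scores.add((7, 5))
--     valid_scores.add((5, 7))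
--     valid_scores.add((7, 6))
--     valid_scores.add((6, 7))
--     return (p1, p2) in valid_scores
-- ===== SOURCE B (Python) =====
-- def validate_set_score(p1, p2):
--     """Validate a single set score follows tennis rules."""
--     if p1 is None or p2 is None:
--         return True  # optional set
--     if not (isinstance(p1, int) and isinstance(p2, int)):
--         return False
--     if p1 < 0 or p2 < 0:
--         return False
--     hi, lo = max(p1, p2), min(p1, p2)
--     return (hi == 6 and lo <= 4) or (hi == 7 and lo in (5, 6))
-- ===== Notes on version B (the rewrite author's own statement) =====
-- stated objective: simpler
-- what changed: Replaces building a set of valid score tuples and membership testing with a direct closed-form arithmetic predicate on max/min of the two scores.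
import Mathlib
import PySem

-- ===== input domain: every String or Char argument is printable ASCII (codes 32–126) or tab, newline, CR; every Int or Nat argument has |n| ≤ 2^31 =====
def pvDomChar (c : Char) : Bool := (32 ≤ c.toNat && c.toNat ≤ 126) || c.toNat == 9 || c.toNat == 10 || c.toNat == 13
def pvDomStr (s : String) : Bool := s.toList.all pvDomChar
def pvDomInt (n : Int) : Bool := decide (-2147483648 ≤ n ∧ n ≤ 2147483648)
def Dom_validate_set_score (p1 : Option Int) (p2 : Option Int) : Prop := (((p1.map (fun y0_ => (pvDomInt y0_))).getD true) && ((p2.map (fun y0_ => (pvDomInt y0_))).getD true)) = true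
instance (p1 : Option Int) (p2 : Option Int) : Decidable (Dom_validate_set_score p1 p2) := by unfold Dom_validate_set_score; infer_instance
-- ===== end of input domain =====

-- B replaces A's set of valid tuples + membership test by a closed-form predicate on max/min (simpler).
-- (The isinstance guard of A is vacuous under the Option Int typing and has no Lean counterpart.)

-- ===== PORT A =====
def validate_set_score (p1 : Option Int) (p2 : Option Int) : Bool :=
  match p1, p2 with
  | none, _ => true
  | _, none => true
  | some a, some b =>
    if a < 0 || b < 0 then false
    else
      let valid_scores : PySem.Set (Int × Int) :=
        (PySem.List.pyRange 0 5 1).foldl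
          (fun s w => PySem.Set.add (PySem.Set.add s (6, w)) (w, 6)) PySem.Set.empty
      let valid_scores := PySem.Set.add valid_scores (7, 5)
      let valid_scores := PySem.Set.add valid_scores (5, 7)
      let valid_scores := PySem.Set.add valid_scores (7, 6)
      let valid_scores := PySem.Set.add valid_scores (6, 7)
      PySem.Set.contains valid_scores (a, b)

-- ===== PORT B =====
def validate_set_score_alt (p1 : Option Int) (p2 : Option Int) : Bool :=
  match p1, p2 with
  | none, _ => true
  | _, none => true
  | some a, some b =>
    if a < 0 || b < 0 then false
    else
      let hi := max a b
      let lo := min a b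
      (hi == 6 && lo ≤ 4) || (hi == 7 && (lo == 5 || lo == 6))

-- ===== PRECONDITION & SPEC =====
def Spec_validate_set_score (p1 : Option Int) (p2 : Option Int) (out : Bool) : Prop := out = validate_set_score_alt p1 p2
instance (p1 : Option Int) (p2 : Option Int) (out : Bool) : Decidable (Spec_validate_set_score p1 p2 out) := by unfold Spec_validate_set_score; infer_instance

-- ===== CLAIM (what is proved, stated in full; the proofs are below) =====
def Claim_equal_validate_set_score : Prop := ∀ (p1 : Option Int) (p2 : Option Int), Dom_validate_set_score p1 p2 → Spec_validate_set_score p1 p2 (validate_set_score p1 p2)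

-- ===== LEMMAS AND PROOFS =====

-- ===== VERDICT (by name: the statement is the Claim_ definition above) =====
theorem validate_set_score_spec : Claim_equal_validate_set_score := by
  intro p1 p2 _
  unfold Spec_validate_set_score validate_set_score validate_set_score_alt
  match p1, p2 with
  | none, _ => rfl
  | some a, none => rfl
  | some a, some b =>
    have hset : PySem.Set.add (PySem.Set.add (PySem.Set.add (PySem.Set.add
        ((PySem.List.pyRange 0 5 1).foldl
          (fun s w => PySem.Set.add (PySem.Set.add s (6, w)) (w, 6)) PySem.Set.empty)
        ((7 : Int), (5 : Int))) (5, 7)) (7, 6)) (6, 7)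
        = [(6,0),(0,6),(6,1),(1,6),(6,2),(2,6),(6,3),(3,6),(6,4),(4,6),(7,5),(5,7),(7,6),(6,7)] := by
      decide
    by_cases h : a < 0 || b < 0
    · simp only [h, if_true]
    · simp only [h]
      rw [hset, Bool.eq_iff_iff]
      simp only [Bool.false_eq_true, if_false, PySem.Set.contains, List.contains_eq_mem,
        List.mem_cons, List.not_mem_nil, or_false, Prod.mk.injEq, Bool.or_eq_true,
        Bool.and_eq_true, beq_iff_eq, decide_eq_true_eq]
      simp only [Bool.or_eq_true, decide_eq_true_eq, not_or] at h
      rcases le_total a b with hab | hab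
      · rw [max_eq_right hab, min_eq_left hab]
        constructor
        · intro hx; omega
        · rintro (⟨h6, h4⟩ | ⟨h7, h5 | h6'⟩)
          · subst h6
            have ha0 : 0 ≤ a := by omega
            interval_cases a <;> simp
          · subst h7; subst h5; simp
          · subst h7; subst h6'; simp
      · rw [max_eq_left hab, min_eq_right hab]
        constructor
        · intro hx; omega
        · rintro (⟨h6, h4⟩ | ⟨h7, h5 | h6'⟩)
          · subst h6
            have hb0 : 0 ≤ b := by omega
            interval_cases b <;> simp
          · subst h7; subst h5; simp
          · subst h7; subst h6'; simp
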